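-- pv_equiv track=rewrite | github.com/cutejiuges/leetcode-practice | python-version/LC3356/min_zero_array.py | __check
-- ===== SOURCE A (Python) =====
-- def __check(nums: list[int], queries: list[list[int]], k: int) -> bool:
--     n = len(nums)
--     diff_array = [0] * n
--     for query in queries[:k]:
--         diff_array[query[0]] += query[2]
--         if query[1] < n - 1:
--             diff_array[query[1] + 1] -= query[2]
--
--     sum_diff = 0
--     for i, diff in enumerate(diff_array):
--         sum_diff += diff
--         if nums[i] > sum_diff:
--             return False
--     return True
-- ===== SOURCE B (Python) =====
-- def __check(nums: list[int], queries: list[list[int]], k: int) -> bool: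
--     qs = queries[:k]
--     return all(
--         x <= sum(q[2] for q in qs if q[0] <= i <= q[1])
--         for i, x in enumerate(nums)
--     )
-- ===== Notes on version B (the rewrite author's own statement) =====
-- stated objective: simpler
-- what changed: Replaces the mutable difference-array + running prefix-sum scan with a direct per-index summation: for each index i, B sums q[2] over the sliced queries whose [q[0],q[1]] interval contains i, and checks nums[i] <= that coverage. Pre_ excludes processed queries whose start index is negative or >= len(nums) or whose end lies before the start, where A either raises IndexError or returns accidental values from negative-index wraparound / reversed-interval difference marks.
-- outside the precondition, e.g. on __check([0, 0, 0, 0, 0], [[3, 1, 1]], 1): A returns False, B returns True; on __check([5, 1], [[-1, 1, 5]], 1): A returns False, B returns True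
import Mathlib
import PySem

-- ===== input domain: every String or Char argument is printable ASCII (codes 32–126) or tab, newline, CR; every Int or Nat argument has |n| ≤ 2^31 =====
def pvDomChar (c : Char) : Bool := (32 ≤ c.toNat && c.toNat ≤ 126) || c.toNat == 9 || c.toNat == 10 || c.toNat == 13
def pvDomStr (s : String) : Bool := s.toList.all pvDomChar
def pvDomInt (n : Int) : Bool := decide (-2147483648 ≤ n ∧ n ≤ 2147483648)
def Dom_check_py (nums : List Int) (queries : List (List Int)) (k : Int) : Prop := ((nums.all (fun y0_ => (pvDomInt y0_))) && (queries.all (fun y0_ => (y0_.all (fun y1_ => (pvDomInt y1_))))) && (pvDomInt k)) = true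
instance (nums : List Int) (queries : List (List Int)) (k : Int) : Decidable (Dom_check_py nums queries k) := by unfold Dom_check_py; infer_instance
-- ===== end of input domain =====

-- B replaces A's mutable difference array + running prefix-sum scan by a direct per-index
-- coverage sum over the sliced queries (simpler, no mutation; not faster).

-- ===== PORT A =====
-- one iteration of A's first loop:
--   diff_array[query[0]] += query[2]; if query[1] < n - 1: diff_array[query[1] + 1] -= query[2]
-- (the pySetD/pyGetD totalisations only matter on IndexError inputs, which Pre_ excludes)
def pvStepA (n : Nat) (diff : List Int) (q : List Int) : List Int :=
  let l := PySem.List.pyGetD q 0 0      -- query[0]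
  let r := PySem.List.pyGetD q 1 0      -- query[1]
  let v := PySem.List.pyGetD q 2 0      -- query[2]
  let diff1 := PySem.List.pySetD diff l (PySem.List.pyGetD diff l 0 + v)
  if r < (n : Int) - 1 then
    PySem.List.pySetD diff1 (r + 1) (PySem.List.pyGetD diff1 (r + 1) 0 - v)
  else diff1

-- A's second loop: walks diff_array keeping the running sum sum_diff; nums[i] is the
-- parallel element of nums (diff_array has length len(nums) by construction)
def pvScanA : List Int → List Int → Int → Bool
  | x :: xs, d :: ds, s =>
      let s' := s + d
      if x > s' then false else pvScanA xs ds s'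
  | _, _, _ => true

def check_py (nums : List Int) (queries : List (List Int)) (k : Int) : Bool :=
  let n := nums.length
  let diff := (PySem.List.slice queries none (some k)).foldl (pvStepA n) (List.replicate n 0)
  pvScanA nums diff 0

-- ===== PORT B =====
-- sum(q[2] for q in qs if q[0] <= i <= q[1])
def pvCovAt (qs : List (List Int)) (i : Int) : Int :=
  qs.foldl (fun s q =>
    if PySem.List.pyGetD q 0 0 ≤ i ∧ i ≤ PySem.List.pyGetD q 1 0
    then s + PySem.List.pyGetD q 2 0 else s) 0

-- all(x <= sum(...) for i, x in enumerate(nums))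
def pvScanB (qs : List (List Int)) : List Int → Int → Bool
  | [], _ => true
  | x :: xs, i => decide (x ≤ pvCovAt qs i) && pvScanB qs xs (i + 1)

def check_py_alt (nums : List Int) (queries : List (List Int)) (k : Int) : Bool :=
  let qs := PySem.List.slice queries none (some k)
  pvScanB qs nums 0

-- ===== PRECONDITION & SPEC =====
-- Pre_ excludes processed queries of length < 3 or with a start index outside [0, len(nums))
-- (A raises IndexError, or wraps a negative start around) and queries whose end lies before
-- the start (A's two difference marks then yield accidental values for a reversed interval).
def Pre_check_py (nums : List Int) (queries : List (List Int)) (k : Int) : Prop :=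
  ∀ q ∈ PySem.List.slice queries none (some k),
    3 ≤ q.length ∧ 0 ≤ PySem.List.pyGetD q 0 0 ∧
    PySem.List.pyGetD q 0 0 < (nums.length : Int) ∧
    PySem.List.pyGetD q 0 0 ≤ PySem.List.pyGetD q 1 0
instance (nums : List Int) (queries : List (List Int)) (k : Int) : Decidable (Pre_check_py nums queries k) := by unfold Pre_check_py; infer_instance

def pvWitness_check_py : List Int × List (List Int) × Int := ([1, 2], [[0, 1, 2]], 1)

def Spec_check_py (nums : List Int) (queries : List (List Int)) (k : Int) (out : Bool) : Prop := out = check_py_alt nums queries k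
instance (nums : List Int) (queries : List (List Int)) (k : Int) (out : Bool) : Decidable (Spec_check_py nums queries k out) := by unfold Spec_check_py; infer_instance

-- ===== CLAIM (what is proved, stated in full; the proofs are below) =====
def Claim_equal_check_py : Prop := ∀ (nums : List Int) (queries : List (List Int)) (k : Int), Dom_check_py nums queries k → Pre_check_py nums queries k → Spec_check_py nums queries k (check_py nums queries k)

-- ===== LEMMAS AND PROOFS =====

-- prefix sum of ds up to and including index i (A's sum_diff after step i)
def pvPsum (ds : List Int) (i : Nat) : Int := ((ds.take (i + 1)).sum)

-- the per-query conditions Pre_ states, for one query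
def pvValid (n : Nat) (q : List Int) : Prop :=
  3 ≤ q.length ∧ 0 ≤ PySem.List.pyGetD q 0 0 ∧
  PySem.List.pyGetD q 0 0 < (n : Int) ∧
  PySem.List.pyGetD q 0 0 ≤ PySem.List.pyGetD q 1 0

theorem pv_sum_take_set (xs : List Int) : ∀ (j : Nat) (w : Int) (i : Nat), j < xs.length →
    ((xs.set j w).take (i + 1)).sum
      = (xs.take (i + 1)).sum + (if j ≤ i then w - xs.getD j 0 else 0) := by
  induction xs with
  | nil => intro j w i hj; simp at hj
  | cons x xs ih =>
    intro j w i hj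
    cases j with
    | zero => simp [List.take_succ_cons]; ring
    | succ j =>
      cases i with
      | zero => simp [List.take_succ_cons]
      | succ i =>
        simp only [List.set_cons_succ, List.take_succ_cons, List.sum_cons, List.getD_cons_succ]
        rw [ih j w i (by simpa using hj)]
        simp only [Nat.add_le_add_iff_right]
        split <;> ring

theorem pv_length_stepA (n : Nat) (diff : List Int) (q : List Int) :
    (pvStepA n diff q).length = diff.length := by
  unfold pvStepA
  dsimp only
  split <;> simp [PySem.List.length_pySetD]

theorem pv_psum_stepA (n : Nat) (diff : List Int) (q : List Int) (i : Nat)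
    (hq : pvValid n q) (hlen : diff.length = n) (hi : i < n) :
    pvPsum (pvStepA n diff q) i
      = pvPsum diff i
        + (if PySem.List.pyGetD q 0 0 ≤ (i : Int) ∧ (i : Int) ≤ PySem.List.pyGetD q 1 0
           then PySem.List.pyGetD q 2 0 else 0) := by
  obtain ⟨hq3, hl0, hln, hlr⟩ := hq
  set l := PySem.List.pyGetD q 0 0 with hldef
  set r := PySem.List.pyGetD q 1 0 with hrdef
  set v := PySem.List.pyGetD q 2 0 with hvdef
  have hset1 : PySem.List.pySetD diff l (PySem.List.pyGetD diff l 0 + v)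
      = diff.set l.toNat (diff.getD l.toNat 0 + v) := by
    rw [PySem.List.pySetD_of_nonneg _ _ hl0, PySem.List.pyGetD_of_nonneg _ _ hl0]
  have hlt : l.toNat < diff.length := by omega
  have hsum1 : ∀ m : Nat, pvPsum (diff.set l.toNat (diff.getD l.toNat 0 + v)) m
      = pvPsum diff m + (if l.toNat ≤ m then v else 0) := by
    intro m
    unfold pvPsum
    rw [pv_sum_take_set _ _ _ _ hlt]
    congr 1
    split <;> simp [List.getD_eq_getElem?_getD, List.getElem?_eq_getElem hlt]
  unfold pvStepA pvPsum
  dsimp only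
  rw [← hldef, ← hrdef, ← hvdef]
  split
  · -- query[1] < n - 1: the closing mark at query[1] + 1 is written
    rename_i hr
    rw [hset1]
    have hr1 : (0:Int) ≤ r + 1 := by omega
    rw [PySem.List.pySetD_of_nonneg _ _ hr1, PySem.List.pyGetD_of_nonneg _ _ hr1]
    have hrlt : (r+1).toNat < (diff.set l.toNat (diff.getD l.toNat 0 + v)).length := by
      simp; omega
    rw [pv_sum_take_set _ _ _ _ hrlt]
    have := hsum1 i
    unfold pvPsum at this
    rw [this]
    simp only [List.getD_eq_getElem?_getD]
    split <;> split <;> (try split) <;> omega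
  · rename_i hr
    rw [hset1]
    have := hsum1 i
    unfold pvPsum at this
    rw [this]
    congr 1
    have h1 : ((i:Int) ≤ r) := by omega
    split <;> split <;> first | rfl | (exfalso; omega)

theorem pv_covAt_shift (qs : List (List Int)) (i : Int) (s : Int) :
    qs.foldl (fun s q =>
      if PySem.List.pyGetD q 0 0 ≤ i ∧ i ≤ PySem.List.pyGetD q 1 0
      then s + PySem.List.pyGetD q 2 0 else s) s = s + pvCovAt qs i := by
  induction qs generalizing s with
  | nil => simp [pvCovAt]
  | cons q qs ih =>
    rw [List.foldl_cons, ih]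
    conv_rhs => rw [pvCovAt, List.foldl_cons, ih]
    split <;> ring

theorem pv_psum_fold (n : Nat) (qs : List (List Int)) : ∀ (diff : List Int) (i : Nat),
    (∀ q ∈ qs, pvValid n q) → diff.length = n → i < n →
    pvPsum (qs.foldl (pvStepA n) diff) i = pvPsum diff i + pvCovAt qs (i : Int) := by
  induction qs with
  | nil => intro diff i _ _ _; simp [pvCovAt]
  | cons q qs ih =>
    intro diff i hq hlen hi
    rw [List.foldl_cons]
    rw [ih _ i (fun q hq' => hq q (List.mem_cons_of_mem _ hq'))
        (by rw [pv_length_stepA]; exact hlen) hi]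
    rw [pv_psum_stepA n diff q i (hq q List.mem_cons_self) hlen hi]
    conv_rhs => rw [pvCovAt, List.foldl_cons, pv_covAt_shift]
    split <;> ring

theorem pv_scan_eq (qs : List (List Int)) :
    ∀ (xs ds : List Int) (s : Int) (i : Int),
    xs.length = ds.length →
    (∀ j : Nat, j < xs.length → s + pvPsum ds j = pvCovAt qs (i + (j : Int))) →
    pvScanA xs ds s = pvScanB qs xs i := by
  intro xs
  induction xs with
  | nil => intro ds s i _ _; cases ds <;> rfl
  | cons x xs ih =>
    intro ds s i hlen h
    cases ds with
    | nil => simp at hlen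
    | cons d ds =>
      have hcov : s + d = pvCovAt qs i := by
        simpa [pvPsum] using h 0 (by simp)
      rw [pvScanA, pvScanB]
      rw [hcov]
      by_cases hx : x > pvCovAt qs i
      · simp [hx]
      · rw [if_neg hx]
        have hd : decide (x ≤ pvCovAt qs i) = true := by simp; omega
        rw [hd, Bool.true_and, ← hcov]
        apply ih ds (s + d) (i + 1) (by simpa using hlen)
        intro j hj
        have hstep := h (j + 1) (by simpa using Nat.succ_lt_succ hj)
        have hps : pvPsum (d :: ds) (j + 1) = d + pvPsum ds j := by
          simp [pvPsum, List.take_succ_cons]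
        rw [hps] at hstep
        rw [show i + 1 + (j : Int) = i + ((j : Nat) + 1 : Int) by ring]
        push_cast at hstep ⊢
        omega

theorem pv_length_fold (n : Nat) (qs : List (List Int)) : ∀ diff : List Int,
    (qs.foldl (pvStepA n) diff).length = diff.length := by
  induction qs with
  | nil => intro diff; rfl
  | cons q qs ih => intro diff; rw [List.foldl_cons, ih, pv_length_stepA]

theorem pv_psum_replicate (n j : Nat) : pvPsum (List.replicate n (0:Int)) j = 0 := by
  simp [pvPsum, List.take_replicate]

theorem check_py_main (nums : List Int) (queries : List (List Int)) (k : Int)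
    (hpre : ∀ q ∈ PySem.List.slice queries none (some k), pvValid nums.length q) :
    check_py nums queries k = check_py_alt nums queries k := by
  unfold check_py check_py_alt
  apply pv_scan_eq
  · rw [pv_length_fold]; simp
  · intro j hj
    rw [pv_psum_fold nums.length _ _ j hpre (by simp) hj, pv_psum_replicate]
    simp

-- ===== VERDICT (by name: the statement is the Claim_ definition above) =====
theorem check_py_spec : Claim_equal_check_py := by
  intro nums queries k _ hpre
  unfold Spec_check_py
  exact check_py_main nums queries k (fun q hq => hpre q hq)
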